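-- pv_equiv track=rewrite | github.com/IsaelGabriel/mc-102 | lab06.py | correlacao_cruzada
-- ===== SOURCE A (Python) =====
-- def correlacao_cruzada(vetor: list[int], mascara: list[int]) -> list[int]:
--     vetor_resultante: list[int] = []
--     k = len(mascara)
--     n = len(vetor)
--
--     for i in range(n - k + 1):
--         valor = 0
--         for j in range(k):
--             valor += vetor[i+j]*mascara[j]
--         vetor_resultante.append(valor)
--
--     return vetor_resultante
-- ===== SOURCE B (Python) =====
-- def correlacao_cruzada(vetor: list[int], mascara: list[int]) -> list[int]:
--     # Stream view: each mask weight w_j scales the window vetor[j:j+m]; the result is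
--     # the column-wise sum of these equal-length streams under zip(*...).  The all-zero
--     # base stream fixes the output length m (also for an empty mask).
--     m = max(len(vetor) - len(mascara) + 1, 0)
--     streams = [[0] * m] + [[v * w for v in vetor[j:j + m]] for j, w in enumerate(mascara)]
--     return [sum(col) for col in zip(*streams)]
-- ===== Notes on version B (the rewrite author's own statement) =====
-- stated objective: alternative
-- what changed: B abandons the index-based loop nest: it builds one scaled, shifted stream per mask weight ([v*w for v in vetor[j:j+m]]), plus an all-zero base stream of the output length m, and obtains the result by transposing with zip(*streams) and summing each column; zip's truncation yields the output length, including the empty cases.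
import Mathlib
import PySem

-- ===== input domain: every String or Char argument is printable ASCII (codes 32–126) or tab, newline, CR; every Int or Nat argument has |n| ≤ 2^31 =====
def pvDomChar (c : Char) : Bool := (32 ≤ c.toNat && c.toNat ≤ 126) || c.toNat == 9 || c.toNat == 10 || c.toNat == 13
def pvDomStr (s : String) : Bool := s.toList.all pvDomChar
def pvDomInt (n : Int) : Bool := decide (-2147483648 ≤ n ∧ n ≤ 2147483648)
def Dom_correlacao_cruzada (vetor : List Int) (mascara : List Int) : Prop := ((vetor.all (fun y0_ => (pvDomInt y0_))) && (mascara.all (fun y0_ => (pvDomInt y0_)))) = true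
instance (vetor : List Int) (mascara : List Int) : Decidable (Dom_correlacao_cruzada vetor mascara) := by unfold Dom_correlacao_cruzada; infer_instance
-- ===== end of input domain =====

-- B replaces the sliding dot-product loop nest by a stream view: each mask weight
-- scales a tail of the vector, and the result is the column-wise sum of these
-- streams under zip truncation; objective: alternative decomposition, same cost.

-- ===== PORT A =====
-- for i in range(n-k+1): valor = 0; for j in range(k): valor += vetor[i+j]*mascara[j]; append.
-- Python range(n-k+1) is empty for k > n+1; Nat subtraction n+1-k yields exactly that count.
-- All indices i+j and j are provably in range, so List.getD is exact here.
def correlacao_cruzada (vetor : List Int) (mascara : List Int) : List Int :=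
  let k := mascara.length
  let n := vetor.length
  (List.range (n + 1 - k)).foldl
    (fun acc i =>
      acc ++ [(List.range k).foldl (fun valor j => valor + vetor.getD (i + j) 0 * mascara.getD j 0) 0])
    []

-- ===== PORT B =====
-- zip(*streams): columns up to the shortest stream; every index is in range there, so getD is exact.
def pyZipStar (ss : List (List Int)) : List (List Int) :=
  match ss with
  | [] => []
  | s :: rest =>
      (List.range (rest.foldl (fun a t => min a t.length) s.length)).map
        (fun i => ss.map (fun t => t.getD i 0))

-- m = max(n - k + 1, 0); streams = [[0]*m] + [[v*w for v in vetor[j:j+m]] for j,w in enumerate(mascara)]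
-- return [sum(col) for col in zip(*streams)]
def correlacao_cruzada_alt (vetor : List Int) (mascara : List Int) : List Int :=
  let m : Int := max ((vetor.length : Int) - (mascara.length : Int) + 1) 0
  let streams : List (List Int) :=
    List.replicate m.toNat (0 : Int) ::
      (PySem.List.enumerate mascara).map
        (fun p => (PySem.List.slice vetor (some p.1) (some (p.1 + m))).map (fun v => v * p.2))
  (pyZipStar streams).map List.sum

-- ===== PRECONDITION & SPEC =====
def Spec_correlacao_cruzada (vetor : List Int) (mascara : List Int) (out : List Int) : Prop := out = correlacao_cruzada_alt vetor mascara
instance (vetor : List Int) (mascara : List Int) (out : List Int) : Decidable (Spec_correlacao_cruzada vetor mascara out) := by unfold Spec_correlacao_cruzada; infer_instance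

-- ===== CLAIM (what is proved, stated in full; the proofs are below) =====
def Claim_equal_correlacao_cruzada : Prop := ∀ (vetor : List Int) (mascara : List Int), Dom_correlacao_cruzada vetor mascara → Spec_correlacao_cruzada vetor mascara (correlacao_cruzada vetor mascara)

-- ===== LEMMAS AND PROOFS =====

-- A running min over stream lengths never drops below a lower bound of all of them.
theorem foldl_min_len_eq (l : List (List Int)) (a : Nat) (h : ∀ t ∈ l, a ≤ t.length) :
    l.foldl (fun a t => min a t.length) a = a := by
  induction l generalizing a with
  | nil => rfl
  | cons t ts ih =>
      simp only [List.foldl_cons]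
      rw [min_eq_left (h t (by simp))]
      exact ih a (fun u hu => h u (by simp [hu]))

-- The j-th stream of B is the j-th window of vetor scaled by mascara[j].
theorem stream_mem_shape (vetor mascara : List Int) (t : List Int)
    (ht : t ∈ (PySem.List.enumerate mascara).map
        (fun p => (PySem.List.slice vetor (some p.1)
            (some (p.1 + max ((vetor.length : Int) - (mascara.length : Int) + 1) 0))).map
          (fun v => v * p.2))) :
    ∃ j : Nat, ∃ hj : j < mascara.length,
      t = ((vetor.drop j).take (vetor.length + 1 - mascara.length)).map
            (fun v => v * mascara[j]) := by
  rcases List.mem_map.mp ht with ⟨p, hp, rfl⟩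
  rcases (PySem.List.mem_enumerate_iff _ _ _).mp hp with ⟨j, hj, rfl⟩
  refine ⟨j, hj, ?_⟩
  have h0 : (0 : Int) + (j : Nat) = ((j : Nat) : Int) := by omega
  rw [h0, PySem.List.slice_toNat vetor (by positivity) (by positivity)]
  congr 2
  omega

-- Every stream has length exactly m = n+1-k, so the zip keeps all m columns.
theorem streams_min_len (vetor mascara : List Int) :
    ((PySem.List.enumerate mascara).map
        (fun p => (PySem.List.slice vetor (some p.1)
            (some (p.1 + max ((vetor.length : Int) - (mascara.length : Int) + 1) 0))).map
          (fun v => v * p.2))).foldl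
      (fun a t => min a t.length)
      (List.replicate (max ((vetor.length : Int) - (mascara.length : Int) + 1) 0).toNat (0 : Int)).length
      = vetor.length + 1 - mascara.length := by
  have hbase : (List.replicate (max ((vetor.length : Int) - (mascara.length : Int) + 1) 0).toNat (0 : Int)).length
      = vetor.length + 1 - mascara.length := by
    simp only [List.length_replicate]
    omega
  rw [hbase]
  apply foldl_min_len_eq
  intro t ht
  rcases stream_mem_shape vetor mascara t ht with ⟨j, hj, rfl⟩
  simp only [List.length_map, List.length_take, List.length_drop]
  omega

-- Column i of the streams sums to A's inner dot product at offset i.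
theorem column_sum (vetor mascara : List Int) (i : Nat)
    (hi : i < vetor.length + 1 - mascara.length) :
    ((List.replicate (max ((vetor.length : Int) - (mascara.length : Int) + 1) 0).toNat (0 : Int) ::
        (PySem.List.enumerate mascara).map
          (fun p => (PySem.List.slice vetor (some p.1)
              (some (p.1 + max ((vetor.length : Int) - (mascara.length : Int) + 1) 0))).map
            (fun v => v * p.2))).map
      (fun t => t.getD i 0)).sum
    = ((List.range mascara.length).map
        (fun j => vetor.getD (i + j) 0 * mascara.getD j 0)).sum := by
  have hcols : ((PySem.List.enumerate mascara).map
      (fun p => (PySem.List.slice vetor (some p.1)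
          (some (p.1 + max ((vetor.length : Int) - (mascara.length : Int) + 1) 0))).map
        (fun v => v * p.2))).map
        (fun t => t.getD i 0)
      = (List.range mascara.length).map
        (fun j => vetor.getD (i + j) 0 * mascara.getD j 0) := by
    apply List.ext_getElem
    · simp [PySem.List.length_enumerate]
    · intro j h1 h2
      simp only [List.length_map, PySem.List.length_enumerate] at h1
      simp only [List.getElem_map, PySem.List.getElem_enumerate, List.getElem_range]
      have hjr : j < mascara.length := by simpa using h1
      have h0 : (0 : Int) + (j : Nat) = ((j : Nat) : Int) := by omega
      rw [h0, PySem.List.slice_toNat vetor (by positivity) (by positivity)]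
      have hw : (((j : Nat) : Int) + max ((vetor.length : Int) - (mascara.length : Int) + 1) 0).toNat
            - ((j : Nat) : Int).toNat = vetor.length + 1 - mascara.length := by omega
      rw [hw]
      have hlen : i < (((vetor.drop ((j : Nat) : Int).toNat).take (vetor.length + 1 - mascara.length)).map
          (fun v => v * mascara[j])).length := by
        simp only [List.length_map, List.length_take, List.length_drop, Int.toNat_natCast]
        omega
      have hij : i + j < vetor.length := by omega
      rw [List.getD_eq_getElem _ _ hlen, List.getElem_map, List.getElem_take, List.getElem_drop,
        List.getD_eq_getElem _ _ hij, List.getD_eq_getElem _ _ hjr]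
      simp [Nat.add_comm j i]
  simp only [List.map_cons, List.sum_cons, hcols]
  simp

-- ===== VERDICT (by name: the statement is the Claim_ definition above) =====
theorem correlacao_cruzada_spec : Claim_equal_correlacao_cruzada := by
  intro vetor mascara _
  unfold Spec_correlacao_cruzada correlacao_cruzada correlacao_cruzada_alt pyZipStar
  simp only []
  rw [streams_min_len vetor mascara]
  rw [PySem.List.foldl_append_singleton_eq_map]
  rw [List.map_map]
  apply List.map_congr_left
  intro i hi
  have hi' : i < vetor.length + 1 - mascara.length := List.mem_range.mp hi
  rw [PySem.List.foldl_add, Function.comp_apply, column_sum vetor mascara i hi']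
  simp
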